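-- pv_equiv track=rewrite | github.com/UkiDelly/Code_Test | 2023.09.08/problem_11.py | solution
-- ===== SOURCE A (Python) =====
-- def solution(code: str) -> str:
--     mode: int = 0
--     answer: str = ""
--
--     for index, value in enumerate(code):
--         if value.isdigit():
--             mode = not mode
--             continue
--
--         if mode:
--             if index % 2 == 1:
--                 answer += value
--         else:
--             if index % 2 == 0:
--                 answer += value
--     return "EMPTY" if answer == "" else answer
-- ===== SOURCE B (Python) =====
-- def solution(code: str) -> str:
--     # pass 1: parity (0/1) of the number of digits strictly before each position
--     pars = [0] * len(code)
--     p = 0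
--     for i, c in enumerate(code):
--         pars[i] = p
--         if c.isdigit():
--             p ^= 1
--     # pass 2: keep non-digit chars whose index parity equals the digit-count parity
--     ans = "".join(c for i, c in enumerate(code)
--                   if not c.isdigit() and i % 2 == pars[i])
--     return ans if ans else "EMPTY"
-- ===== Notes on version B (the rewrite author's own statement) =====
-- stated objective: alternative
-- what changed: Replaces A's single fused loop (toggling a mode flag and appending inline) with two separate passes: first build a table of digit-count parities strictly before each index, then a filtering comprehension keeping non-digit chars whose index parity equals the table entry.
import Mathlib
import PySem

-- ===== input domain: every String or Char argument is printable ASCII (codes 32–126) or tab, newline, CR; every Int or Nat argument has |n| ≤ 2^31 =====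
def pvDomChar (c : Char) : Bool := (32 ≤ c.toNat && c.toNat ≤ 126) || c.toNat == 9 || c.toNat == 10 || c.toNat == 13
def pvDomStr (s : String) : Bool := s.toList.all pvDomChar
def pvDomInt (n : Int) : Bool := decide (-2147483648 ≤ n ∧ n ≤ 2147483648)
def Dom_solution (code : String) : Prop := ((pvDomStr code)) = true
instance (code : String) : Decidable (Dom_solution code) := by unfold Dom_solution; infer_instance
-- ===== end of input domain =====

-- B replaces A's fused mode-toggling loop by a precomputed digit-parity table plus a
-- separate filtering pass (objective: alternative decomposition, same cost).

-- ===== PORT A =====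
def solutionStep (st : Bool × List Char) (iv : Int × Char) : Bool × List Char :=
  if PySem.Chars.isdigit iv.2 then (!st.1, st.2)
  else if st.1 then
    (if PySem.Int.mod iv.1 2 == 1 then (st.1, st.2 ++ [iv.2]) else st)
  else
    (if PySem.Int.mod iv.1 2 == 0 then (st.1, st.2 ++ [iv.2]) else st)

def solution (code : String) : String :=
  let st := (PySem.List.enumerate code.toList).foldl solutionStep (false, [])
  if st.2 = [] then "EMPTY" else String.ofList st.2

-- ===== PORT B =====
-- pass 1 of Source B: parity of digits strictly before each position
def buildPars : List Char → Bool → List Bool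
  | [], _ => []
  | c :: cs, p => p :: buildPars cs (if PySem.Chars.isdigit c then !p else p)

-- pass 2 of Source B: the filtering comprehension
def keepChar (q : (Int × Char) × Bool) : Option Char :=
  if !(PySem.Chars.isdigit q.1.2) && ((PySem.Int.mod q.1.1 2 == 1) == q.2) then some q.1.2 else none

def solution_alt (code : String) : String :=
  let pars := buildPars code.toList false
  let ans := ((PySem.List.enumerate code.toList).zip pars).filterMap keepChar
  if ans = [] then "EMPTY" else String.ofList ans

-- ===== PRECONDITION & SPEC =====
def Spec_solution (code : String) (out : String) : Prop := out = solution_alt code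
instance (code : String) (out : String) : Decidable (Spec_solution code out) := by unfold Spec_solution; infer_instance

-- ===== CLAIM (what is proved, stated in full; the proofs are below) =====
def Claim_equal_solution : Prop := ∀ (code : String), Dom_solution code → Spec_solution code (solution code)

-- ===== LEMMAS AND PROOFS =====
lemma mod_two_cases (s : Int) : s % 2 = 0 ∨ s % 2 = 1 := by omega

lemma fold_eq_filter (xs : List Char) (s : Int) (mode : Bool) (acc : List Char) :
    ((PySem.List.enumerate xs s).foldl solutionStep (mode, acc)).2
      = acc ++ ((PySem.List.enumerate xs s).zip (buildPars xs mode)).filterMap keepChar := by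
  induction xs generalizing s mode acc with
  | nil => simp [PySem.List.enumerate_nil]
  | cons c cs ih =>
    rw [PySem.List.enumerate_cons]
    by_cases hd : PySem.Chars.isdigit c
    · simp [buildPars, solutionStep, keepChar, hd, ih]
    · rcases mod_two_cases s with hm | hm <;> cases mode <;>
        simp [buildPars, solutionStep, keepChar, hd, hm, ih]

-- ===== VERDICT (by name: the statement is the Claim_ definition above) =====
theorem solution_spec : Claim_equal_solution := by
  intro code _
  unfold Spec_solution solution solution_alt
  simp only []
  rw [fold_eq_filter]
  simp
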